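-- pv_equiv track=rewrite | github.com/Iftakharpy/Colt-Steele-Datastructures-and-Algorithms | Section-5 Problem Solving Patterns/compare_array_Freequency_Counter.py | fairly_good_Same
-- ===== SOURCE A (Python) =====
-- def fairly_good_Same(list1, list2):
--     if len(list1)!=len(list2):
--         return False
--
--     lookup_table = {}
--     for item in list2: #O(n)
--         if lookup_table.get(item): #O(1)
--             lookup_table[item]+=1
--         else:
--             lookup_table[item]=1
--
--     for num in list1: #O(m)
--         num = num**2
--         if lookup_table.get(num): #O(1)
--             lookup_table[num]-=1
--         else:
--             return False
--     return True
-- ===== SOURCE B (Python) =====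
-- def fairly_good_Same(list1, list2):
--     return sorted(x * x for x in list1) == sorted(list2)
-- ===== Notes on version B (the rewrite author's own statement) =====
-- stated objective: simpler
-- what changed: Replaces A's length guard plus hash-table build pass and decrement-with-early-exit check pass by a one-liner: sort the squares of list1, sort list2, compare the two sorted lists for equality.
import Mathlib
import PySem

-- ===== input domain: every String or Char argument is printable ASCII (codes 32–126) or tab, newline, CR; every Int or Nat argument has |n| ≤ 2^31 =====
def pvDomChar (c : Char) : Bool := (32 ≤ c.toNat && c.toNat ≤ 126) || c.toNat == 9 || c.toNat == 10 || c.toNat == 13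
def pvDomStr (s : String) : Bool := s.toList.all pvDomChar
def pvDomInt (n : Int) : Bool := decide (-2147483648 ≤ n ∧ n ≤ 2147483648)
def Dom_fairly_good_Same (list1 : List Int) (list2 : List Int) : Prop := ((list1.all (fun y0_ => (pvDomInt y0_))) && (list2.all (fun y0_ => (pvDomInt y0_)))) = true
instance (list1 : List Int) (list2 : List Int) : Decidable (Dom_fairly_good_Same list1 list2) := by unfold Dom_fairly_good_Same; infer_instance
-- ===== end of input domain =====

-- ===== PORT A =====
-- B replaces A's hash-table build + decrement/early-exit passes by comparing sorted squares with sorted list2 (simpler one-liner; same return values).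

-- truthiness of lookup_table.get(item): None and 0 are falsy
def pvTruthy (o : Option Int) : Bool :=
  match o with
  | none => false
  | some v => v != 0

-- second loop of A: for num in list1: ... with early 'return False'
def pvCheck : List Int → PySem.Dict Int Int → Bool
  | [], _ => true
  | x :: xs, t =>
      let num := x ^ 2
      if pvTruthy (t.get? num) then pvCheck xs (t.insert num (t.getD num 0 - 1))
      else false

def fairly_good_Same (list1 : List Int) (list2 : List Int) : Bool :=
  if list1.length ≠ list2.length then false
  else
    let lookup_table : PySem.Dict Int Int :=
      list2.foldl (fun t item =>
        if pvTruthy (t.get? item) then t.insert item (t.getD item 0 + 1)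
        else t.insert item 1) PySem.Dict.empty
    pvCheck list1 lookup_table

-- ===== PORT B =====
def fairly_good_Same_alt (list1 : List Int) (list2 : List Int) : Bool :=
  decide (PySem.List.sorted (list1.map (fun x => x * x)) (fun x => x) false
        = PySem.List.sorted list2 (fun x => x) false)

-- ===== PRECONDITION & SPEC =====
def Spec_fairly_good_Same (list1 : List Int) (list2 : List Int) (out : Bool) : Prop := out = fairly_good_Same_alt list1 list2
instance (list1 : List Int) (list2 : List Int) (out : Bool) : Decidable (Spec_fairly_good_Same list1 list2 out) := by unfold Spec_fairly_good_Same; infer_instance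

-- ===== CLAIM (what is proved, stated in full; the proofs are below) =====
def Claim_equal_fairly_good_Same : Prop := ∀ (list1 : List Int) (list2 : List Int), Dom_fairly_good_Same list1 list2 → Spec_fairly_good_Same list1 list2 (fairly_good_Same list1 list2)

-- ===== LEMMAS AND PROOFS =====

-- abstract version of A's check loop, over the count function only
def pvCnt : List Int → (Int → Int) → Bool
  | [], _ => true
  | x :: xs, f =>
      if f (x ^ 2) ≠ 0 then pvCnt xs (fun k => if k = x ^ 2 then f k - 1 else f k)
      else false

lemma pvTruthy_get? (t : PySem.Dict Int Int) (k : Int) :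
    pvTruthy (t.get? k) = decide (t.getD k 0 ≠ 0) := by
  cases h : t.get? k with
  | none => simp [pvTruthy, PySem.Dict.getD_eq_get?_getD, h]
  | some v =>
      simp only [pvTruthy, PySem.Dict.getD_eq_get?_getD, h, Option.getD_some, bne]
      by_cases hv : v = 0 <;> simp [hv]

lemma pvCnt_congr (l : List Int) (f g : Int → Int) (h : ∀ k, f k = g k) :
    pvCnt l f = pvCnt l g := by
  have : f = g := funext h
  subst this; rfl

lemma pvCheck_eq_pvCnt (l : List Int) (t : PySem.Dict Int Int) :
    pvCheck l t = pvCnt l (fun k => t.getD k 0) := by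
  induction l generalizing t with
  | nil => rfl
  | cons x xs ih =>
      simp only [pvCheck, pvCnt, pvTruthy_get?, decide_eq_true_eq]
      by_cases h : t.getD (x ^ 2) 0 ≠ 0
      · rw [if_pos h, if_pos h, ih]
        exact pvCnt_congr _ _ _
          (fun k => by by_cases hk : k = x ^ 2 <;> simp [PySem.Dict.getD_insert, hk])
      · rw [if_neg h, if_neg h]

lemma build_eq_counter (l : List Int) :
    l.foldl (fun t item =>
        if pvTruthy (t.get? item) then t.insert item (t.getD item 0 + 1)
        else t.insert item 1) PySem.Dict.empty = PySem.Dict.counter l := by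
  have hstep : ∀ (t : PySem.Dict Int Int) (x : Int),
      (if pvTruthy (t.get? x) then t.insert x (t.getD x 0 + 1) else t.insert x 1)
        = t.insert x (t.getD x 0 + 1) := by
    intro t x
    rw [pvTruthy_get?]
    by_cases h : t.getD x 0 ≠ 0
    · simp [h]
    · push Not at h
      simp [h]
  simp only [hstep]
  exact PySem.Dict.foldl_insert_getD_add_one_eq_counter l

lemma cons_subperm_iff (a : Int) (s t : List Int) :
    List.Subperm (a :: s) t ↔ a ∈ t ∧ List.Subperm s (t.erase a) := by
  constructor
  · intro h
    refine ⟨h.subset (List.mem_cons_self), ?_⟩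
    have := h.erase a
    simpa using this
  · rintro ⟨hm, hs⟩
    have h1 : List.Subperm (a :: s) (a :: t.erase a) := (List.subperm_cons a).mpr hs
    exact h1.trans (List.perm_cons_erase hm).symm.subperm

lemma pvCnt_count (l1 l2 : List Int) :
    pvCnt l1 (fun k => (l2.count k : Int)) = true ↔ List.Subperm (l1.map (fun x => x ^ 2)) l2 := by
  induction l1 generalizing l2 with
  | nil => simp [pvCnt]
  | cons x xs ih =>
      simp only [pvCnt, List.map_cons]
      by_cases hm : x ^ 2 ∈ l2
      · have hc : 0 < l2.count (x ^ 2) := List.count_pos_iff.mpr hm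
        have hne : ((l2.count (x ^ 2) : Int) ≠ 0) := by positivity
        simp only [cons_subperm_iff]
        have hfun : ∀ k, (if k = x ^ 2 then (l2.count k : Int) - 1 else (l2.count k : Int))
            = ((l2.erase (x ^ 2)).count k : Int) := by
          intro k
          by_cases hk : k = x ^ 2
          · subst hk
            rw [if_pos rfl, List.count_erase_self]
            omega
          · rw [if_neg hk, List.count_erase_of_ne hk]
        rw [pvCnt_congr _ _ _ hfun, if_pos hne, ih]
        simp [hm]
      · have hc : l2.count (x ^ 2) = 0 := List.count_eq_zero.mpr hm
        simp only [hc, Nat.cast_zero, ne_eq, not_true_eq_false, if_false]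
        constructor
        · intro h; cases h
        · intro h
          exact absurd (h.subset (List.mem_cons_self)) hm
      
lemma alt_iff_perm (l1 l2 : List Int) :
    fairly_good_Same_alt l1 l2 = true ↔ (l1.map (fun x => x * x)).Perm l2 := by
  rw [fairly_good_Same_alt, decide_eq_true_iff]
  exact PySem.List.sorted_id_eq_sorted_id_iff_perm _ _

lemma a_iff (l1 l2 : List Int) :
    fairly_good_Same l1 l2 = true ↔
      l1.length = l2.length ∧ List.Subperm (l1.map (fun x => x ^ 2)) l2 := by
  rw [fairly_good_Same]
  by_cases h : l1.length ≠ l2.length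
  · simp [h]
  · push Not at h
    simp only [h, ne_eq, not_true_eq_false, if_false]
    rw [pvCheck_eq_pvCnt, build_eq_counter]
    have : (fun k => (PySem.Dict.counter l2).getD k 0) = (fun k => (l2.count k : Int)) := by
      funext k; exact PySem.Dict.getD_counter l2 k
    rw [this, pvCnt_count]
    simp

-- ===== VERDICT (by name: the statement is the Claim_ definition above) =====
theorem fairly_good_Same_spec : Claim_equal_fairly_good_Same := by
  intro l1 l2 _
  show fairly_good_Same l1 l2 = fairly_good_Same_alt l1 l2
  have hsq : l1.map (fun x => x ^ 2) = l1.map (fun x => x * x) := by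
    simp [pow_two]
  have hiff : fairly_good_Same l1 l2 = true ↔ fairly_good_Same_alt l1 l2 = true := by
    rw [a_iff, alt_iff_perm, hsq]
    constructor
    · rintro ⟨hlen, hsub⟩
      exact hsub.perm_of_length_le (by simpa using hlen.symm.le)
    · intro hp
      exact ⟨by simpa using hp.length_eq, hp.subperm⟩
  cases hA : fairly_good_Same l1 l2 <;> cases hB : fairly_good_Same_alt l1 l2 <;>
    simp_all
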